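-- pv_equiv track=rewrite | github.com/banks1923/Rock | text_utils.py | _format_quotes
-- ===== SOURCE A (Python) =====
-- def _format_quotes(text: str) -> str:
--     """Format quoted email content"""
--     lines = text.split('\n')
--     formatted_lines = []
--
--     for line in lines:
--         if line.strip().startswith('>'):
--             formatted_lines.append(f"<i>{line}</i>")
--         else:
--             formatted_lines.append(line)
--
--     return '\n'.join(formatted_lines)
-- ===== SOURCE B (Python) =====
-- def _format_quotes(text: str) -> str:
--     """Single forward pass over the text by index: locate each line's end with
--     str.find, skip leading intra-line whitespace, and emit the pieces into one
--     buffer -- no per-line split/strip/join."""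
--     out = []
--     n = len(text)
--     start = 0
--     while True:
--         end = text.find('\n', start)
--         if end == -1:
--             end = n
--         i = start
--         while i < end and text[i] in ' \t\r\x0b\x0c':
--             i += 1
--         if i < end and text[i] == '>':
--             out.append('<i>')
--             out.append(text[start:end])
--             out.append('</i>')
--         else:
--             out.append(text[start:end])
--         if end == n:
--             break
--         out.append('\n')
--         start = end + 1
--     return ''.join(out)
-- ===== Notes on version B (the rewrite author's own statement) =====
-- stated objective: alternative
-- what changed: Replaces A's split-into-a-line-list, per-line strip-and-prefix-test, then join pipeline with a single forward index scan over the text that locates each line end with str.find, skips leading intra-line whitespace to test for the quote marker, and emits the wrapped or plain pieces into one output buffer.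
import Mathlib
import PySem

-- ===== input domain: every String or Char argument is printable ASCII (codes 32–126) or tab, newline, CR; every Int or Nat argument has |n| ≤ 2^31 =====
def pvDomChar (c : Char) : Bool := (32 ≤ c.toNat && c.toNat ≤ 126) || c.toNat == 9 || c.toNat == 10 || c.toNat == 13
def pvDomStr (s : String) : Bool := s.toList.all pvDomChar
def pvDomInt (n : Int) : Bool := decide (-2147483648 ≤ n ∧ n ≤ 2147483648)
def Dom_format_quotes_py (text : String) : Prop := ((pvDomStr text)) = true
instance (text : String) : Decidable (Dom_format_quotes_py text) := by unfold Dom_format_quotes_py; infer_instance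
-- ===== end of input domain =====

-- B re-implements A's split/strip-per-line/join pipeline as one forward scan over the
-- characters that finds each line end, skips leading intra-line whitespace and emits the
-- wrapped or plain line directly (objective: alternative single-pass decomposition).

-- ===== PORT A =====
-- literal port of Source A: split on '\n', per line test line.strip().startswith('>'),
-- append the wrapped or plain line to an accumulator, join with '\n'
def format_quotes_py (text : String) : String :=
  let lines : List String := (PySem.Chars.splitOn text.toList ['\n']).map String.ofList
  let formatted_lines : List String :=
    lines.foldl (fun acc line =>
      if PySem.Str.startswith (PySem.Str.strip line) ">" then acc ++ ["<i>" ++ line ++ "</i>"]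
      else acc ++ [line]) []
  PySem.Str.join "\n" formatted_lines

-- ===== PORT B =====
-- the whitespace Source B's inner scan skips: ' \t\r\x0b\x0c' (never '\n')
def pvLineWs (c : Char) : Bool := c == ' ' || c == '\t' || c == '\r' || c == '\x0B' || c == '\x0C'

-- the piece Source B emits for the current line: skip leading whitespace, test '>', wrap or copy
def pvOut (cs : List Char) : List Char :=
  let line := cs.takeWhile (· ≠ '\n')
  if (line.dropWhile pvLineWs).head? == some '>'
  then '<' :: 'i' :: '>' :: (line ++ ['<', '/', 'i', '>'])
  else line

-- port of Source B's while-loop: Source B walks the text by index (find('\n'), skip whitespace,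
-- emit pieces, break at the end); here the same scan is the recursion on the remaining characters
def pvScan (cs : List Char) : List Char :=
  match h : cs.dropWhile (· ≠ '\n') with
  | [] => pvOut cs
  | _ :: t => pvOut cs ++ '\n' :: pvScan t
termination_by cs.length
decreasing_by
  have h2 := List.length_dropWhile_le (· ≠ '\n') cs
  rw [h] at h2; simp at h2; omega

def format_quotes_py_alt (text : String) : String := String.ofList (pvScan text.toList)

-- ===== PRECONDITION & SPEC =====
def Spec_format_quotes_py (text : String) (out : String) : Prop := out = format_quotes_py_alt text
instance (text : String) (out : String) : Decidable (Spec_format_quotes_py text out) := by unfold Spec_format_quotes_py; infer_instance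

-- ===== CLAIM (what is proved, stated in full; the proofs are below) =====
def Claim_equal_format_quotes_py : Prop := ∀ (text : String), Dom_format_quotes_py text → Spec_format_quotes_py text (format_quotes_py text)

-- ===== LEMMAS AND PROOFS =====

theorem charBeq_toNat (c d : Char) : (c == d) = decide (c.toNat = d.toNat) := by
  rcases Decidable.em (c = d) with h | h
  · subst h; simp
  · have h2 : ¬ c.toNat = d.toNat := fun hn => h (Char.ext (UInt32.toNat_inj.mp hn))
    simp [h, h2]

-- on domain characters other than '\n', Python's str.isspace set coincides with Source B's set
theorem ws_eq (c : Char) (h1 : pvDomChar c = true) (h2 : c ≠ '\n') :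
    PySem.Chars.isspace c = pvLineWs c := by
  have h3 : ¬ c.toNat = 10 := fun hn => h2 (Char.ext (UInt32.toNat_inj.mp hn))
  simp only [pvDomChar, Bool.or_eq_true, Bool.and_eq_true, beq_iff_eq, decide_eq_true_eq] at h1
  simp only [PySem.Chars.isspace, pvLineWs, charBeq_toNat, Char.reduceToNat]
  rw [Bool.eq_iff_iff]
  simp only [Bool.or_eq_true, Bool.and_eq_true, decide_eq_true_eq]
  omega

theorem dropWhile_congr' {α : Type} (p q : α → Bool) (l : List α)
    (h : ∀ x ∈ l, p x = q x) : l.dropWhile p = l.dropWhile q := by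
  induction l with
  | nil => rfl
  | cons a t ih =>
    have ha := h a (List.mem_cons_self)
    simp only [List.dropWhile_cons, ha]
    split
    · exact ih (fun x hx => h x (List.mem_cons_of_mem _ hx))
    · rfl

theorem splitOn_go_single (c : Char) :
    ∀ (fuel : Nat) (l cur : List Char) (acc : List (List Char)), l.length < fuel →
    PySem.Chars.splitOn.go [c] fuel l cur acc =
      acc.reverse ++ (cur.reverse ++ l.takeWhile (· ≠ c)) ::
        (match l.dropWhile (· ≠ c) with | [] => [] | _ :: t => PySem.Chars.splitOn t [c]) := by
  intro fuel
  induction fuel using Nat.strong_induction_on with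
  | _ fuel ih =>
    intro l cur acc h
    match fuel, h with
    | f + 1, h =>
    cases l with
    | nil => simp [PySem.Chars.splitOn.go]
    | cons a rest =>
      have hrl : rest.length < f := by simp only [List.length_cons] at h; omega
      rcases Decidable.em (a = c) with hc | hc
      · subst hc
        have hpre : [a].isPrefixOf (a :: rest) = true := by simp [List.isPrefixOf]
        rw [PySem.Chars.splitOn.go]
        simp only [hpre, if_true, List.length_cons, List.length_nil, List.drop_succ_cons,
          List.drop_zero]
        rw [ih f (by omega) rest [] (cur.reverse :: acc) hrl]
        have hrest : PySem.Chars.splitOn rest [a] =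
            ([] : List (List Char)).reverse ++ (([] : List Char).reverse ++ rest.takeWhile (· ≠ a)) ::
              (match rest.dropWhile (· ≠ a) with | [] => [] | _ :: t => PySem.Chars.splitOn t [a]) :=
          ih (rest.length + 1) (by omega) rest [] [] (by omega)
        simp only [List.reverse_nil, List.nil_append] at hrest
        rw [show List.takeWhile (fun x => decide (x ≠ a)) (a :: rest) = [] by simp]
        rw [show List.dropWhile (fun x => decide (x ≠ a)) (a :: rest) = a :: rest by simp]
        rw [show (match a :: rest with | [] => ([] : List (List Char)) | _ :: t => PySem.Chars.splitOn t [a]) = PySem.Chars.splitOn rest [a] from rfl]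
        rw [hrest]
        simp only [List.reverse_nil, List.reverse_cons, List.append_assoc, List.cons_append, List.nil_append, List.append_nil]
      · have hpre : [c].isPrefixOf (a :: rest) = false := by
          simp [List.isPrefixOf]; exact fun hn => hc hn.symm
        rw [PySem.Chars.splitOn.go]
        simp only [hpre, Bool.false_eq_true, if_false]
        rw [ih f (by omega) rest (a :: cur) acc hrl]
        simp [hc]

theorem splitOn_single (c : Char) (cs : List Char) :
    PySem.Chars.splitOn cs [c] =
      cs.takeWhile (· ≠ c) ::
        (match cs.dropWhile (· ≠ c) with | [] => [] | _ :: t => PySem.Chars.splitOn t [c]) := by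
  unfold PySem.Chars.splitOn
  rw [splitOn_go_single c (cs.length + 1) cs [] [] (by omega)]
  simp only [List.reverse_nil, List.nil_append]
  rfl

theorem startswith_head (x : List Char) :
    PySem.Chars.startswith x ['>'] = (x.head? == some '>') := by
  cases x with
  | nil => simp [PySem.Chars.startswith, List.isPrefixOf]
  | cons a t =>
    have h1 : PySem.Chars.startswith (a :: t) ['>'] = ('>' == a) := by
      simp [PySem.Chars.startswith, List.isPrefixOf]
    rw [h1, List.head?_cons]
    rw [Bool.eq_iff_iff]
    simp only [beq_iff_eq, Option.some.injEq]
    exact ⟨fun h => h.symm, fun h => h.symm⟩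

theorem rstrip_head (a : Char) (t : List Char) (ha : PySem.Chars.isspace a = false) :
    (PySem.Chars.rstrip (a :: t)).head? = some a := by
  unfold PySem.Chars.rstrip
  rw [show (a :: t).reverse = t.reverse ++ [a] by simp]
  rw [List.dropWhile_append]
  split
  · simp [ha]
  · rename_i hne
    rw [List.reverse_append]
    cases hd : (List.dropWhile PySem.Chars.isspace t.reverse) with
    | nil => rw [hd] at hne; simp at hne
    | cons b u => simp

-- the per-line condition: strip().startswith('>') equals Source B's skip-whitespace-then-'>' test
theorem cond_eq (line : List Char) (hdom : ∀ ch ∈ line, pvDomChar ch = true)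
    (hnl : '\n' ∉ line) :
    PySem.Chars.startswith (PySem.Chars.strip line) ['>'] =
      ((line.dropWhile pvLineWs).head? == some '>') := by
  have hcongr : line.dropWhile PySem.Chars.isspace = line.dropWhile pvLineWs :=
    dropWhile_congr' _ _ _ (fun x hx => ws_eq x (hdom x hx) (fun he => hnl (he ▸ hx)))
  unfold PySem.Chars.strip PySem.Chars.lstrip
  cases hd : line.dropWhile PySem.Chars.isspace with
  | nil =>
    rw [← hcongr, hd]
    simp [PySem.Chars.rstrip, PySem.Chars.startswith]
  | cons a u =>
    have ha : PySem.Chars.isspace a = false := by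
      have := List.head?_dropWhile_not PySem.Chars.isspace line
      rw [hd] at this; simpa using this
    rw [startswith_head]
    rw [rstrip_head a u ha]
    rw [hcongr] at hd
    rw [hd]
    simp

-- A's per-line formatting function, on the character-list side
def pvLineA (l : List Char) : List Char :=
  if PySem.Chars.startswith (PySem.Chars.strip l) ['>']
  then '<' :: 'i' :: '>' :: (l ++ ['<', '/', 'i', '>'])
  else l

theorem pvScan_drop_nil (cs : List Char) (h : cs.dropWhile (· ≠ '\n') = []) :
    pvScan cs = pvOut cs := by
  rw [pvScan.eq_def]
  split
  · rfl
  · rename_i b t h2; rw [h2] at h; cases h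

theorem pvScan_drop_cons (cs : List Char) (b : Char) (t : List Char)
    (h : cs.dropWhile (· ≠ '\n') = b :: t) :
    pvScan cs = pvOut cs ++ '\n' :: pvScan t := by
  conv_lhs => rw [pvScan.eq_def]
  split
  · rename_i h2; rw [h2] at h; cases h
  · rename_i b' t' h2
    rw [h2] at h
    cases h
    rfl

theorem join_cons_ne (x : List Char) (ys : List (List Char)) (h : ys ≠ []) :
    PySem.Chars.join ['\n'] (x :: ys) = x ++ '\n' :: PySem.Chars.join ['\n'] ys := by
  cases ys with
  | nil => exact absurd rfl h
  | cons y t => rw [PySem.Chars.join_cons_cons]; simp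

theorem main_join (n : Nat) : ∀ (cs : List Char), cs.length ≤ n →
    (∀ ch ∈ cs, pvDomChar ch = true) →
    PySem.Chars.join ['\n'] ((PySem.Chars.splitOn cs ['\n']).map pvLineA) = pvScan cs := by
  induction n with
  | zero =>
    intro cs h hdom
    have hc : cs = [] := List.eq_nil_of_length_eq_zero (Nat.le_zero.mp h)
    subst hc
    rw [pvScan_drop_nil [] (by decide)]
    decide
  | succ m ih =>
    intro cs h hdom
    have hlinedom : ∀ ch ∈ cs.takeWhile (· ≠ '\n'), pvDomChar ch = true :=
      fun ch hch => hdom ch ((List.takeWhile_prefix _).subset hch)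
    have hlinenl : '\n' ∉ cs.takeWhile (· ≠ '\n') := by
      intro hm; have := List.mem_takeWhile_imp hm; simp at this
    have hcond := cond_eq (cs.takeWhile (· ≠ '\n')) hlinedom hlinenl
    have hA : pvLineA (cs.takeWhile (· ≠ '\n')) = pvOut cs := by
      simp only [pvLineA, pvOut, hcond]
    rw [splitOn_single]
    cases hd : cs.dropWhile (· ≠ '\n') with
    | nil =>
      rw [pvScan_drop_nil cs hd]
      simp only [List.map_cons, List.map_nil, PySem.Chars.join_singleton]
      exact hA
    | cons b t =>
      have hlen : t.length ≤ m := by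
        have h2 := List.length_dropWhile_le (· ≠ '\n') cs
        rw [hd] at h2; simp at h2; omega
      have htdom : ∀ ch ∈ t, pvDomChar ch = true := by
        intro ch hch
        exact hdom ch ((List.dropWhile_suffix (· ≠ '\n')).subset (hd ▸ List.mem_cons_of_mem b hch))
      rw [pvScan_drop_cons cs b t hd]
      simp only []
      rw [List.map_cons]
      rw [join_cons_ne _ _ (by rw [splitOn_single]; simp)]
      rw [ih t hlen htdom, hA]

-- A's explicit accumulator loop is the map of the per-line formatter
theorem foldl_lineA (p : String → Bool) (w : String → String) :
    ∀ (l : List String) (acc : List String),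
    l.foldl (fun acc line => if p line then acc ++ [w line] else acc ++ [line]) acc =
      acc ++ l.map (fun line => if p line then w line else line) := by
  intro l
  induction l with
  | nil => simp
  | cons a t ih => intro acc; rcases Decidable.em (p a = true) with h | h <;> simp [h, ih]

theorem format_quotes_py_spec' (text : String) (hdom : Dom_format_quotes_py text) :
    format_quotes_py text = format_quotes_py_alt text := by
  have hdom' : ∀ ch ∈ text.toList, pvDomChar ch = true := by
    unfold Dom_format_quotes_py pvDomStr at hdom
    simpa [List.all_eq_true] using hdom
  have hA : format_quotes_py text =
      PySem.Str.join "\n" (((PySem.Chars.splitOn text.toList ['\n']).map String.ofList).foldl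
        (fun acc line =>
          if PySem.Str.startswith (PySem.Str.strip line) ">" then acc ++ ["<i>" ++ line ++ "</i>"]
          else acc ++ [line]) []) := rfl
  rw [hA, foldl_lineA]
  unfold format_quotes_py_alt
  rw [← main_join text.toList.length text.toList (le_refl _) hdom']
  unfold PySem.Str.join
  apply congrArg String.ofList
  rw [show ("\n" : String).toList = ['\n'] from rfl]
  apply congrArg (PySem.Chars.join ['\n'])
  simp only [List.nil_append, List.map_map]
  apply List.map_congr_left
  intro l _
  simp only [Function.comp_apply, pvLineA]
  rw [show PySem.Str.startswith (PySem.Str.strip (String.ofList l)) ">" =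
      PySem.Chars.startswith (PySem.Chars.strip l) ['>'] by
    simp [PySem.Str.startswith, PySem.Str.strip]]
  split
  · simp [String.toList_append]
  · simp

-- ===== VERDICT (by name: the statement is the Claim_ definition above) =====
theorem format_quotes_py_spec : Claim_equal_format_quotes_py := by
  intro text hdom
  unfold Spec_format_quotes_py
  exact format_quotes_py_spec' text hdom
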